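-- pv_equiv track=rewrite | github.com/mehmed77/acm_ursu | backend/apps/submissions/judge_engine.py | _strip_python_comment
-- ===== SOURCE A (Python) =====
-- def _strip_python_comment(line: str) -> str:
--     """
--     Strip Python inline comment while respecting string literals.
--
--     Naive str.find('#') treats '#' inside a string as a comment start,
--     enabling the bypass:  '"#"; import os'  →  strips 'import os' silently.
--     This function walks the line char-by-char, tracking string state, and
--     only recognises '#' as a comment delimiter when outside any string.
--     """
--     i = 0
--     n = len(line)
--     while i < n:
--         c = line[i]
--         if c in ('"', "'"):
--             # Detect triple-quote opener
--             triple = line[i:i + 3]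
--             if triple in ('"""', "'''"):
--                 quote = triple
--                 i += 3
--                 while i < n:
--                     if line[i:i + 3] == quote:
--                         i += 3
--                         break
--                     if line[i] == '\\':
--                         i += 2
--                     else:
--                         i += 1
--             else:
--                 quote = c
--                 i += 1
--                 while i < n:
--                     if line[i] == '\\':
--                         i += 2
--                         continue
--                     if line[i] == quote:
--                         i += 1
--                         break
--                     i += 1
--         elif c == '#':
--             return line[:i]   # Real comment — strip from here
--         else:
--             i += 1
--     return line
-- ===== SOURCE B (Python) =====
-- def _strip_python_comment(line: str) -> str:
--     # Flat finite-state machine: one pass, one loop; state = current quote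
--     # ('' = outside any string), plus an escaped flag and a skip counter.
--     state = ''
--     escaped = False
--     skip = 0
--     for i, c in enumerate(line):
--         if skip:
--             skip -= 1
--         elif state:
--             if escaped:
--                 escaped = False
--             elif len(state) == 3 and line[i:i + 3] == state:
--                 state = ''
--                 skip = 2
--             elif c == '\\':
--                 escaped = True
--             elif len(state) == 1 and c == state:
--                 state = ''
--         elif c == '#':
--             return line[:i]
--         elif c in '"\'':
--             if line[i:i + 3] == c * 3:
--                 state = c * 3
--                 skip = 2
--             else:
--                 state = c
--     return line
-- ===== Notes on version B (the rewrite author's own statement) =====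
-- stated objective: alternative
-- what changed: Replaced A's nested while-loops (an inner scanning loop per string literal, with index jumps of 2/3) by a single flat for-loop finite-state machine over the characters, carrying a quote-state, an escaped flag and a skip counter.
import Mathlib
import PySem

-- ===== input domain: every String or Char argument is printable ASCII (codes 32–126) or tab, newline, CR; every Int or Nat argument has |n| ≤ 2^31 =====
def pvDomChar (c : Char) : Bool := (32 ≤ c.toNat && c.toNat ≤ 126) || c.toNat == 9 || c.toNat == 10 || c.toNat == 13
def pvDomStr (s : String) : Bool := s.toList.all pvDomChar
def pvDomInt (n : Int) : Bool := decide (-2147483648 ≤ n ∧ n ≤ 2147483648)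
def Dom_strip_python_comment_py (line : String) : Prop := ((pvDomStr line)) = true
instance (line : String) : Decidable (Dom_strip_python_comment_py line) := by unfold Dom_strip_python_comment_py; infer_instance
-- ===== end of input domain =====

-- B replaces A's nested per-string-literal scanning loops by one flat state-machine pass; same O(n) cost, different decomposition.

-- ===== PORT A =====
-- A's inner triple-quote while-loop: returns the index just after the string (or ≥ length).
def aTriple (cs : List Char) (quote : List Char) (i : Nat) : Nat :=
  if h : i < cs.length then
    if (cs.drop i).take 3 = quote then i + 3
    else if cs.getD i ' ' = '\\' then aTriple cs quote (i + 2)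
    else aTriple cs quote (i + 1)
  else i
termination_by cs.length - i
decreasing_by all_goals omega

-- A's inner single-quote while-loop.
def aSingle (cs : List Char) (quote : Char) (i : Nat) : Nat :=
  if h : i < cs.length then
    if cs.getD i ' ' = '\\' then aSingle cs quote (i + 2)
    else if cs.getD i ' ' = quote then i + 1
    else aSingle cs quote (i + 1)
  else i
termination_by cs.length - i
decreasing_by all_goals omega

theorem aTriple_ge (cs : List Char) (quote : List Char) (i : Nat) : i ≤ aTriple cs quote i := by
  fun_induction aTriple cs quote i <;> omega

theorem aSingle_ge (cs : List Char) (quote : Char) (i : Nat) : i ≤ aSingle cs quote i := by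
  fun_induction aSingle cs quote i <;> omega

-- A's outer while-loop: `some i` encodes the early `return line[:i]`, `none` falling through.
def aMain (cs : List Char) (i : Nat) : Option Nat :=
  if h : i < cs.length then
    let c := cs.getD i ' '
    if c = '"' ∨ c = '\'' then
      if (cs.drop i).take 3 = ['"', '"', '"'] ∨ (cs.drop i).take 3 = ['\'', '\'', '\''] then
        aMain cs (aTriple cs ((cs.drop i).take 3) (i + 3))
      else
        aMain cs (aSingle cs c (i + 1))
    else if c = '#' then some i
    else aMain cs (i + 1)
  else none
termination_by cs.length - i
decreasing_by
  · have := aTriple_ge cs ((cs.drop i).take 3) (i + 3); omega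
  · have := aSingle_ge cs (cs.getD i ' ') (i + 1); omega
  · omega

def strip_python_comment_py (line : String) : String :=
  let cs := line.toList
  match aMain cs 0 with
  | some i => String.ofList (cs.take i)
  | none => line

-- ===== PORT B =====
-- B's single flat loop: state = current quote ([] = outside), escaped flag, skip counter.
def bLoop (cs : List Char) (i : Nat) (state : List Char) (escaped : Bool) (skip : Nat) : Option Nat :=
  if h : i < cs.length then
    let c := cs.getD i ' '
    if skip ≠ 0 then bLoop cs (i + 1) state escaped (skip - 1)
    else if state ≠ [] then
      if escaped then bLoop cs (i + 1) state false 0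
      else if state.length = 3 ∧ (cs.drop i).take 3 = state then bLoop cs (i + 1) [] false 2
      else if c = '\\' then bLoop cs (i + 1) state true 0
      else if state.length = 1 ∧ state = [c] then bLoop cs (i + 1) [] false 0
      else bLoop cs (i + 1) state escaped 0
    else if c = '#' then some i
    else if c = '"' ∨ c = '\'' then
      if (cs.drop i).take 3 = [c, c, c] then bLoop cs (i + 1) [c, c, c] false 2
      else bLoop cs (i + 1) [c] false 0
    else bLoop cs (i + 1) [] false 0
  else none
termination_by cs.length - i
decreasing_by all_goals omega

def strip_python_comment_py_alt (line : String) : String :=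
  let cs := line.toList
  match bLoop cs 0 [] false 0 with
  | some i => String.ofList (cs.take i)
  | none => line

-- ===== PRECONDITION & SPEC =====
def Spec_strip_python_comment_py (line : String) (out : String) : Prop := out = strip_python_comment_py_alt line
instance (line : String) (out : String) : Decidable (Spec_strip_python_comment_py line out) := by unfold Spec_strip_python_comment_py; infer_instance

-- ===== CLAIM (what is proved, stated in full; the proofs are below) =====
def Claim_equal_strip_python_comment_py : Prop := ∀ (line : String), Dom_strip_python_comment_py line → Spec_strip_python_comment_py line (strip_python_comment_py line)

-- ===== LEMMAS AND PROOFS =====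

theorem bLoop_none (cs : List Char) (i : Nat) (state : List Char) (escaped : Bool) (skip : Nat)
    (h : ¬ i < cs.length) : bLoop cs i state escaped skip = none := by
  rw [bLoop]; simp [h]

-- the FSM in single-quote state ends up, at the closing index computed by A, back in normal state
theorem bstep (cs : List Char) (i : Nat) (state : List Char) (escaped : Bool) (skip : Nat)
    (h : i < cs.length) :
    bLoop cs i state escaped skip =
      (if skip ≠ 0 then bLoop cs (i + 1) state escaped (skip - 1)
       else if state ≠ [] then
         if escaped then bLoop cs (i + 1) state false 0
         else if state.length = 3 ∧ (cs.drop i).take 3 = state then bLoop cs (i + 1) [] false 2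
         else if cs.getD i ' ' = '\\' then bLoop cs (i + 1) state true 0
         else if state.length = 1 ∧ state = [cs.getD i ' '] then bLoop cs (i + 1) [] false 0
         else bLoop cs (i + 1) state escaped 0
       else if cs.getD i ' ' = '#' then some i
       else if cs.getD i ' ' = '"' ∨ cs.getD i ' ' = '\'' then
         if (cs.drop i).take 3 = [cs.getD i ' ', cs.getD i ' ', cs.getD i ' '] then
           bLoop cs (i + 1) [cs.getD i ' ', cs.getD i ' ', cs.getD i ' '] false 2
         else bLoop cs (i + 1) [cs.getD i ' '] false 0
       else bLoop cs (i + 1) [] false 0) := by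
  rw [bLoop, dif_pos h]

theorem L_single (cs : List Char) (q : Char) (hq : q = '"' ∨ q = '\'') :
    ∀ k i, cs.length - i ≤ k → bLoop cs i [q] false 0 = bLoop cs (aSingle cs q i) [] false 0 := by
  intro k
  induction k with
  | zero =>
    intro i hi
    have h : ¬ i < cs.length := by omega
    rw [bLoop_none _ _ _ _ _ h, aSingle, dif_neg h, bLoop_none _ _ _ _ _ h]
  | succ k ih =>
    intro i hi
    by_cases h : i < cs.length
    · rw [aSingle, dif_pos h, bstep _ _ _ _ _ h]
      have hqbs : q ≠ '\\' := by rcases hq with h' | h' <;> simp [h']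
      by_cases hbs : cs.getD i ' ' = '\\'
      · rw [if_pos hbs]
        simp only [ne_eq, not_true_eq_false, if_false, List.cons_ne_self, not_false_eq_true,
          if_true, Bool.false_eq_true, List.length_cons, List.length_nil]
        rw [if_neg (by simp), if_pos hbs]
        by_cases h2 : i + 1 < cs.length
        · rw [bstep _ _ _ _ _ h2]
          simp only [ne_eq, not_true_eq_false, if_false, List.cons_ne_self, not_false_eq_true,
            if_true]
          exact ih (i + 2) (by omega)
        · rw [bLoop_none _ _ _ _ _ h2]
          have h3 : ¬ i + 2 < cs.length := by omega
          rw [aSingle, dif_neg h3, bLoop_none _ _ _ _ _ h3]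
      · rw [if_neg hbs]
        by_cases hcq : cs.getD i ' ' = q
        · rw [if_pos hcq]
          simp only [ne_eq, not_true_eq_false, if_false, List.cons_ne_self, not_false_eq_true,
            if_true, Bool.false_eq_true]
          rw [if_neg (by simp), if_neg hbs, if_pos ⟨rfl, by simpa [List.getD] using hcq.symm⟩]
        · rw [if_neg hcq]
          simp only [ne_eq, not_true_eq_false, if_false, List.cons_ne_self, not_false_eq_true,
            if_true, Bool.false_eq_true]
          rw [if_neg (by simp), if_neg hbs,
            if_neg (by intro hx; exact hcq (by simpa [List.getD] using hx.2.symm))]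
          exact ih (i + 1) (by omega)
    · rw [bLoop_none _ _ _ _ _ h, aSingle, dif_neg h, bLoop_none _ _ _ _ _ h]

theorem bLoop_skip2 (cs : List Char) (i : Nat) (st : List Char) (esc : Bool)
    (h2 : i + 1 < cs.length) : bLoop cs i st esc 2 = bLoop cs (i + 2) st esc 0 := by
  rw [bstep _ _ _ _ _ (by omega), if_pos (by norm_num : (2:Nat) ≠ 0),
    bstep _ _ _ _ _ (by omega : i + 1 < cs.length)]
  norm_num

theorem L_triple (cs : List Char) (q : Char) (_hq : q = '"' ∨ q = '\'') :
    ∀ k i, cs.length - i ≤ k → bLoop cs i [q, q, q] false 0 = bLoop cs (aTriple cs [q, q, q] i) [] false 0 := by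
  intro k
  induction k with
  | zero =>
    intro i hi
    have h : ¬ i < cs.length := by omega
    rw [bLoop_none _ _ _ _ _ h, aTriple, dif_neg h, bLoop_none _ _ _ _ _ h]
  | succ k ih =>
    intro i hi
    have t0 : ¬ ((0:Nat) ≠ 0) := by norm_num
    have tne : ([q, q, q] : List Char) ≠ [] := by simp
    have tesc : ¬ (false = true) := by simp
    by_cases h : i < cs.length
    · rw [aTriple, dif_pos h, bstep _ _ _ _ _ h, if_neg t0, if_pos tne, if_neg tesc]
      by_cases hcl : (cs.drop i).take 3 = [q, q, q]
      · have hlen : i + 3 ≤ cs.length := by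
          have := congrArg List.length hcl
          simp at this
          omega
        have hcc : ([q, q, q] : List Char).length = 3 ∧ (cs.drop i).take 3 = [q, q, q] :=
          ⟨by simp, hcl⟩
        rw [if_pos hcl, if_pos hcc, bLoop_skip2 cs (i + 1) [] false (by omega)]
      · have hcc : ¬ (([q, q, q] : List Char).length = 3 ∧ (cs.drop i).take 3 = [q, q, q]) :=
          fun hx => hcl hx.2
        rw [if_neg hcl, if_neg hcc]
        by_cases hbs : cs.getD i ' ' = '\\'
        · rw [if_pos hbs, if_pos hbs]
          by_cases h2 : i + 1 < cs.length
          · rw [bstep _ _ _ _ _ h2, if_neg t0, if_pos tne, if_pos rfl]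
            exact ih (i + 2) (by omega)
          · rw [bLoop_none _ _ _ _ _ h2]
            have h3 : ¬ i + 2 < cs.length := by omega
            rw [aTriple, dif_neg h3, bLoop_none _ _ _ _ _ h3]
        · have h1 : ¬ (([q, q, q] : List Char).length = 1 ∧ ([q, q, q] : List Char) = [cs.getD i ' ']) := by
            simp
          rw [if_neg hbs, if_neg hbs, if_neg h1]
          exact ih (i + 1) (by omega)
    · rw [bLoop_none _ _ _ _ _ h, aTriple, dif_neg h, bLoop_none _ _ _ _ _ h]

theorem L_main (cs : List Char) :
    ∀ k i, cs.length - i ≤ k → aMain cs i = bLoop cs i [] false 0 := by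
  intro k
  induction k with
  | zero =>
    intro i hi
    have h : ¬ i < cs.length := by omega
    rw [aMain, dif_neg h, bLoop_none _ _ _ _ _ h]
  | succ k ih =>
    intro i hi
    by_cases h : i < cs.length
    · have t0 : ¬ ((0:Nat) ≠ 0) := by norm_num
      rw [aMain, dif_pos h, bstep _ _ _ _ _ h, if_neg t0,
        if_neg (show ¬ (([]:List Char) ≠ []) by simp)]
      by_cases hquote : cs.getD i ' ' = '"' ∨ cs.getD i ' ' = '\''
      · have hhash : ¬ cs.getD i ' ' = '#' := by
          rcases hquote with h' | h' <;> simp [List.getD] at h' ⊢ <;> simp [h']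
        have htake : (cs.drop i).take 3 = cs.getD i ' ' :: (cs.drop (i + 1)).take 2 := by
          rw [List.drop_eq_getElem_cons h, List.getD_eq_getElem _ _ h]
          rfl
        rw [if_pos hquote, if_neg hhash, if_pos hquote]
        by_cases htr : (cs.drop i).take 3 = [cs.getD i ' ', cs.getD i ' ', cs.getD i ' ']
        · have htr' : (cs.drop i).take 3 = ['"', '"', '"'] ∨ (cs.drop i).take 3 = ['\'', '\'', '\''] := by
            rcases hquote with h' | h'
            · left; rw [htr, h']
            · right; rw [htr, h']
          have hlen : i + 3 ≤ cs.length := by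
            have := congrArg List.length htr
            simp at this
            omega
          rw [if_pos htr', if_pos htr, htr,
            bLoop_skip2 cs (i + 1) [cs.getD i ' ', cs.getD i ' ', cs.getD i ' '] false (by omega)]
          have e3 : i + 1 + 2 = i + 3 := by omega
          rw [e3, L_triple cs _ hquote cs.length (i + 3) (by omega)]
          exact ih _ (by have := aTriple_ge cs [cs.getD i ' ', cs.getD i ' ', cs.getD i ' '] (i + 3); omega)
        · have hne : ¬ ((cs.drop i).take 3 = ['"', '"', '"'] ∨ (cs.drop i).take 3 = ['\'', '\'', '\'']) := by
            rintro (hx | hx) <;> rw [htake] at hx <;> injection hx with h1 h2 <;>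
              exact htr (by rw [htake, h2, h1])
          rw [if_neg hne, if_neg htr, L_single cs _ hquote cs.length (i + 1) (by omega)]
          exact ih _ (by have := aSingle_ge cs (cs.getD i ' ') (i + 1); omega)
      · by_cases hhash : cs.getD i ' ' = '#'
        · rw [if_neg hquote, if_pos hhash, if_pos hhash]
        · rw [if_neg hquote, if_neg hhash, if_neg hhash, if_neg hquote]
          exact ih (i + 1) (by omega)
    · rw [aMain, dif_neg h, bLoop_none _ _ _ _ _ h]

-- ===== VERDICT (by name: the statement is the Claim_ definition above) =====
theorem strip_python_comment_py_spec : Claim_equal_strip_python_comment_py := by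
  intro line _
  unfold Spec_strip_python_comment_py strip_python_comment_py strip_python_comment_py_alt
  simp only []
  rw [L_main line.toList line.toList.length 0 (by omega)]
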